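-- pv_equiv track=rewrite | github.com/pabsdsr/urology_agent | server/app/services/call_schedule_import.py | _split_entries
-- ===== SOURCE A (Python) =====
-- from typing import Any, Dict, Iterable, List, Tuple
--
-- def _split_entries(cell_value: str) -> List[str]:
--     """
--     Accept either a single entry per cell, or multiple separated by newlines / semicolons.
--     """
--     raw = (cell_value or "").strip()
--     if not raw:
--         return []
--
--     parts: List[str] = []
--     for chunk in raw.replace("\r\n", "\n").split("\n"):
--         chunk = chunk.strip()
--         if not chunk:
--             continue
--         for sub in chunk.split(";"):
--             sub = sub.strip()
--             if sub:
--                 parts.append(sub)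
--     return parts
-- ===== SOURCE B (Python) =====
-- from typing import List
--
-- def _split_entries(cell_value: str) -> List[str]:
--     """
--     Single left-to-right character pass: accumulate a buffer, and on each
--     '\n' or ';' flush the stripped buffer (dropping empties). A lone '\r'
--     is not a delimiter; any '\r' that touches a break is whitespace and is
--     removed by the per-token strip, so no '\r\n' preprocessing is needed.
--     """
--     parts: List[str] = []
--     buf: List[str] = []
--     for ch in (cell_value or "") + "\n":
--         if ch == "\n" or ch == ";":
--             tok = "".join(buf).strip()
--             if tok:
--                 parts.append(tok)
--             buf = []
--         else:
--             buf.append(ch)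
--     return parts
-- ===== Notes on version B (the rewrite author's own statement) =====
-- stated objective: alternative
-- what changed: Replaced the replace('\r\n','\n') plus two nested split/strip loops with a single left-to-right character scan that flushes a stripped buffer at every '\n' or ';' (the '\r\n' preprocessing disappears because '\r' at a token edge is stripped anyway).
import Mathlib
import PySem

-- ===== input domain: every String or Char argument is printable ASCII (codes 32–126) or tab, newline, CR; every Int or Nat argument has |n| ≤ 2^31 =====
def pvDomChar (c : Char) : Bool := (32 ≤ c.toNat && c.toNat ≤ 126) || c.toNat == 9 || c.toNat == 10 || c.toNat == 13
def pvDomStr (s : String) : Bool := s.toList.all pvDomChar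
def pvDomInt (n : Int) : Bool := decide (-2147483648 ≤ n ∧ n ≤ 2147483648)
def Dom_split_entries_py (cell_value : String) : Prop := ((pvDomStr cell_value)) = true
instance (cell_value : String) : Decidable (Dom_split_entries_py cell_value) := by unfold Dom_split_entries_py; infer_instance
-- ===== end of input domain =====

-- B rewrites A's replace('\r\n','\n') + nested split/strip loops as one left-to-right
-- character scan flushing a stripped buffer at each '\n'/';' (objective: alternative, same cost).

-- ===== PORT A =====
-- ported at the Chars level (PySem.Str.* are thin wrappers over PySem.Chars.* on toList);
-- both split separators are the nonempty literals "\n" / ";", so Python's split cannot raise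
-- and PySem.Chars.splitOn (the sep ≠ "" form) is exact.
def split_entries_py (cell_value : String) : List String :=
  -- raw = (cell_value or "").strip(): 'or' is the identity on the values it changes nothing for
  -- a str argument ("" or "" == ""), so raw = cell_value.strip()
  let raw := PySem.Chars.strip cell_value.toList
  if raw = [] then []
  else
    (PySem.Chars.splitOn (PySem.Chars.replace raw ['\r', '\n'] ['\n']) ['\n']).foldl
      (fun parts chunk =>
        let chunk' := PySem.Chars.strip chunk
        if chunk' = [] then parts
        else
          (PySem.Chars.splitOn chunk' [';']).foldl
            (fun parts sub =>
              let sub' := PySem.Chars.strip sub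
              if sub' = [] then parts else parts ++ [String.ofList sub'])
            parts)
      []

-- ===== PORT B =====
def split_entries_py_alt (cell_value : String) : List String :=
  let step := fun (st : List String × List Char) (ch : Char) =>
    if ch = '\n' ∨ ch = ';' then
      (let tok := PySem.Chars.strip st.2
       if tok = [] then st.1 else st.1 ++ [String.ofList tok], [])
    else (st.1, st.2 ++ [ch])
  ((cell_value.toList ++ ['\n']).foldl step ([], [])).1

-- ===== PRECONDITION & SPEC =====
def Spec_split_entries_py (cell_value : String) (out : List String) : Prop := out = split_entries_py_alt cell_value
instance (cell_value : String) (out : List String) : Decidable (Spec_split_entries_py cell_value out) := by unfold Spec_split_entries_py; infer_instance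

-- ===== CLAIM (what is proved, stated in full; the proofs are below) =====
def Claim_equal_split_entries_py : Prop := ∀ (cell_value : String), Dom_split_entries_py cell_value → Spec_split_entries_py cell_value (split_entries_py cell_value)

-- ===== LEMMAS AND PROOFS =====

def psplit (P : Char → Bool) : List Char → List (List Char)
  | [] => [[]]
  | c :: cs => if P c then [] :: psplit P cs else (psplit P cs).modifyHead (c :: ·)

def tokOf (t : List Char) : List String :=
  if PySem.Chars.strip t = [] then [] else [String.ofList (PySem.Chars.strip t)]

lemma psplit_ne_nil (P : Char → Bool) (cs : List Char) : psplit P cs ≠ [] := by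
  induction cs with
  | nil => simp [psplit]
  | cons c cs ih =>
    simp only [psplit]
    split
    · simp
    · cases h : psplit P cs with
      | nil => exact absurd h ih
      | cons a l => simp

lemma psplit_sublist {P : Char → Bool} {cs t : List Char} (ht : t ∈ psplit P cs) :
    ∀ c ∈ t, c ∈ cs := by
  induction cs generalizing t with
  | nil =>
    simp only [psplit, List.mem_singleton] at ht
    simp [ht]
  | cons c cs ih =>
    simp only [psplit] at ht
    intro x hx
    by_cases hc : P c
    · rw [if_pos hc] at ht
      rcases List.mem_cons.mp ht with h | h
      · subst h; simp at hx
      · exact List.mem_cons_of_mem _ (ih h x hx)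
    · rw [if_neg hc] at ht
      obtain ⟨h0, t0, hp⟩ := List.exists_cons_of_ne_nil (psplit_ne_nil P cs)
      rw [hp, List.modifyHead_cons] at ht
      rcases List.mem_cons.mp ht with h | h
      · subst h
        rcases List.mem_cons.mp hx with h | h
        · simp [h]
        · exact List.mem_cons_of_mem _ (ih (by simp [hp]) x h)
      · exact List.mem_cons_of_mem _ (ih (by simp [hp, h]) x hx)

lemma psplit_append (P : Char → Bool) (xs ys : List Char) :
    ∀ {init : List (List Char)} {last : List Char}, psplit P xs = init ++ [last] →
      psplit P (xs ++ ys) = init ++ (psplit P ys).modifyHead (last ++ ·) := by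
  induction xs with
  | nil =>
    intro init last h
    simp only [psplit] at h
    cases init with
    | cons a l => simp at h
    | nil =>
      simp only [List.nil_append, List.cons.injEq] at h
      obtain ⟨h2, -⟩ := h
      subst h2
      cases hys : psplit P ys <;> simp [hys]
  | cons c xs ih =>
    intro init last h
    simp only [List.cons_append, psplit] at h ⊢
    by_cases hc : P c
    · rw [if_pos hc] at h ⊢
      cases init with
      | nil =>
        simp only [List.nil_append, List.cons.injEq] at h
        exact absurd h.2 (psplit_ne_nil P xs)
      | cons i0 init' =>
        simp only [List.cons_append, List.cons.injEq] at h
        rw [ih h.2, ← h.1]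
        simp
    · rw [if_neg hc] at h ⊢
      obtain ⟨h0, t0, hp⟩ := List.exists_cons_of_ne_nil (psplit_ne_nil P xs)
      rw [hp, List.modifyHead_cons] at h
      cases init with
      | nil =>
        simp only [List.nil_append, List.cons.injEq] at h
        obtain ⟨h1, h2⟩ := h
        rw [ih (show psplit P xs = [] ++ [h0] by simp [hp, h2])]
        cases hys : psplit P ys with
        | nil => exact absurd hys (psplit_ne_nil P ys)
        | cons y yt => simp [← h1]
      | cons i0 init' =>
        simp only [List.cons_append, List.cons.injEq] at h
        obtain ⟨h1, h2⟩ := h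
        rw [ih (show psplit P xs = (h0 :: init') ++ [last] by simp [hp, h2])]
        simp [← h1]

lemma strip_cons_space {w : Char} (hw : PySem.Chars.isspace w = true) (t : List Char) :
    PySem.Chars.strip (w :: t) = PySem.Chars.strip t := by
  simp [PySem.Chars.strip, PySem.Chars.lstrip, hw]

lemma strip_append_space {ws : List Char} (hws : ∀ c ∈ ws, PySem.Chars.isspace c = true)
    (t : List Char) : PySem.Chars.strip (t ++ ws) = PySem.Chars.strip t := by
  simp only [PySem.Chars.strip, PySem.Chars.lstrip, PySem.Chars.rstrip, List.dropWhile_append]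
  split
  · rename_i h
    rw [List.dropWhile_eq_nil_iff.mpr hws]
    simp only [List.isEmpty_iff] at h
    simp [h]
  · rename_i h
    simp only [List.reverse_append, List.dropWhile_append]
    rw [List.dropWhile_eq_nil_iff.mpr (by simpa using hws)]
    simp

lemma strip_allspace {t : List Char} (ht : ∀ c ∈ t, PySem.Chars.isspace c = true) :
    PySem.Chars.strip t = [] := by
  simp [PySem.Chars.strip, PySem.Chars.lstrip, PySem.Chars.rstrip,
    List.dropWhile_eq_nil_iff.mpr ht]

lemma tokOf_nil : tokOf [] = [] := by
  simp [tokOf, strip_allspace (t := []) (by simp)]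

lemma tokOf_cons_space {w : Char} (hw : PySem.Chars.isspace w = true) (t : List Char) :
    tokOf (w :: t) = tokOf t := by
  simp [tokOf, strip_cons_space hw]

lemma tokOf_append_space {ws : List Char} (hws : ∀ c ∈ ws, PySem.Chars.isspace c = true)
    (t : List Char) : tokOf (t ++ ws) = tokOf t := by
  simp [tokOf, strip_append_space hws]

lemma psplit_concat (P : Char → Bool) (xs : List Char) :
    ∃ init last, psplit P xs = init ++ [last] := by
  rcases List.eq_nil_or_concat (psplit P xs) with h | ⟨L, b, h⟩
  · exact absurd h (psplit_ne_nil P xs)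
  · exact ⟨L, b, by simpa using h⟩

lemma SA {ws : List Char} (hws : ∀ c ∈ ws, PySem.Chars.isspace c = true)
    (P : Char → Bool) (xs : List Char) :
    (psplit P (xs ++ ws)).flatMap tokOf = (psplit P xs).flatMap tokOf := by
  obtain ⟨init, last, h⟩ := psplit_concat P xs
  rw [psplit_append P xs ws h, h]
  obtain ⟨h0, t0, hp⟩ := List.exists_cons_of_ne_nil (psplit_ne_nil P ws)
  rw [hp, List.modifyHead_cons]
  simp only [List.flatMap_append, List.flatMap_cons]
  have h1 : tokOf (last ++ h0) = tokOf last :=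
    tokOf_append_space (fun c hc => hws c (psplit_sublist (cs := ws) (t := h0) (by rw [hp]; exact List.mem_cons_self ..) c hc)) last
  have h2 : t0.flatMap tokOf = [] := by
    rw [List.flatMap_eq_nil_iff]
    intro t ht
    have h : ∀ c ∈ t, PySem.Chars.isspace c = true :=
      fun c hc => hws c (psplit_sublist (cs := ws) (by rw [hp]; exact List.mem_cons_of_mem _ ht) c hc)
    simp [tokOf, strip_allspace h]
  rw [h1, h2]
  simp

lemma SB {ws : List Char} (hws : ∀ c ∈ ws, PySem.Chars.isspace c = true)
    (P : Char → Bool) (xs : List Char) :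
    (psplit P (ws ++ xs)).flatMap tokOf = (psplit P xs).flatMap tokOf := by
  induction ws with
  | nil => simp
  | cons w ws ih =>
    have hw : PySem.Chars.isspace w = true := hws w (by simp)
    have ih' := ih (fun c hc => hws c (by simp [hc]))
    simp only [List.cons_append, psplit]
    by_cases hc : P w
    · rw [if_pos hc]
      simpa [tokOf_nil] using ih'
    · rw [if_neg hc]
      obtain ⟨h0, t0, hp⟩ := List.exists_cons_of_ne_nil (psplit_ne_nil P (ws ++ xs))
      rw [hp, List.modifyHead_cons]
      simp only [List.flatMap_cons, tokOf_cons_space hw]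
      rw [← List.flatMap_cons, ← hp, ih']

lemma strip_decomp (cs : List Char) :
    ∃ pre suf, (∀ c ∈ pre, PySem.Chars.isspace c = true) ∧ (∀ c ∈ suf, PySem.Chars.isspace c = true) ∧
      cs = pre ++ (PySem.Chars.strip cs ++ suf) := by
  refine ⟨List.takeWhile PySem.Chars.isspace cs,
    (List.takeWhile PySem.Chars.isspace (List.dropWhile PySem.Chars.isspace cs).reverse).reverse,
    fun c hc => List.mem_takeWhile_imp hc, fun c hc => List.mem_takeWhile_imp (List.mem_reverse.mp hc), ?_⟩
  conv_lhs => rw [← List.takeWhile_append_dropWhile (p := PySem.Chars.isspace) (l := cs)]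
  congr 1
  simp only [PySem.Chars.strip, PySem.Chars.lstrip, PySem.Chars.rstrip]
  rw [← List.reverse_append, List.takeWhile_append_dropWhile, List.reverse_reverse]

lemma strip_inv (P : Char → Bool) (cs : List Char) :
    (psplit P (PySem.Chars.strip cs)).flatMap tokOf = (psplit P cs).flatMap tokOf := by
  obtain ⟨pre, suf, h1, h2, h3⟩ := strip_decomp cs
  conv_rhs => rw [h3]
  rw [SB h1, SA h2]

lemma psplit_union (P Q : Char → Bool) (cs : List Char) :
    (psplit P cs).flatMap (psplit Q) = psplit (fun c => P c || Q c) cs := by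
  induction cs with
  | nil => simp [psplit]
  | cons c cs ih =>
    simp only [psplit]
    by_cases hP : P c
    · rw [if_pos hP, if_pos (by simp [hP])]
      simp only [List.flatMap_cons, psplit]
      rw [ih]
      rfl
    · rw [if_neg hP]
      obtain ⟨h0, t0, hp⟩ := List.exists_cons_of_ne_nil (psplit_ne_nil P cs)
      rw [hp, List.modifyHead_cons]
      simp only [List.flatMap_cons, psplit]
      by_cases hQ : Q c
      · rw [if_pos hQ, if_pos (by simp [hQ])]
        rw [← ih, hp]
        simp
      · rw [if_neg hQ, if_neg (by simp [hP, hQ])]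
        rw [← ih, hp]
        simp only [List.flatMap_cons]
        obtain ⟨q0, qt, hq⟩ := List.exists_cons_of_ne_nil (psplit_ne_nil Q h0)
        rw [hq]
        simp

def repl : List Char → List Char
  | [] => []
  | [c] => [c]
  | c :: d :: t => if c = '\r' ∧ d = '\n' then '\n' :: repl t else c :: repl (d :: t)

lemma forall2_tokOf {L1 L2 : List (List Char)}
    (h : List.Forall₂ (fun t t' => t' = t ∨ t' = t ++ ['\r']) L1 L2) :
    L1.flatMap tokOf = L2.flatMap tokOf := by
  induction h with
  | nil => rfl
  | cons hR _ ih =>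
    simp only [List.flatMap_cons, ih]
    rcases hR with h | h
    · rw [h]
    · rw [h,
        tokOf_append_space (show ∀ c ∈ ['\r'], PySem.Chars.isspace c = true by simp [PySem.Chars.isspace])]

lemma repl_inv (P : Char → Bool) (hn : P '\n' = true) (hr : P '\r' = false) (cs : List Char) :
    (psplit P (repl cs)).flatMap tokOf = (psplit P cs).flatMap tokOf := by
  refine forall2_tokOf ?_
  induction cs using repl.induct with
  | case1 => exact List.forall₂_same.mpr (fun x _ => Or.inl rfl)
  | case2 c => exact List.forall₂_same.mpr (fun x _ => Or.inl rfl)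
  | case3 c d t hcd ih =>
    obtain ⟨hc, hd⟩ := hcd
    subst hc; subst hd
    have e2 : repl ('\r' :: '\n' :: t) = '\n' :: repl t := by simp [repl]
    have e3 : psplit P ('\n' :: repl t) = [] :: psplit P (repl t) := by simp [psplit, hn]
    have e1 : psplit P ('\r' :: '\n' :: t) = ['\r'] :: psplit P t := by
      simp [psplit, hn, hr]
    rw [e2, e3, e1]
    exact List.Forall₂.cons (Or.inr rfl) ih
  | case4 c d t hcd ih =>
    have e2 : repl (c :: d :: t) = c :: repl (d :: t) := by
      rw [repl, if_neg hcd]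
    rw [e2]
    by_cases hPc : P c
    · have e : ∀ X, psplit P (c :: X) = [] :: psplit P X := by
        intro X; simp [psplit, hPc]
      rw [e, e]
      exact List.Forall₂.cons (Or.inl rfl) ih
    · have e : ∀ X, psplit P (c :: X) = (psplit P X).modifyHead (c :: ·) := by
        intro X; simp [psplit, hPc]
      rw [e, e]
      obtain ⟨a1, l1, hp1⟩ := List.exists_cons_of_ne_nil (psplit_ne_nil P (repl (d :: t)))
      obtain ⟨a2, l2, hp2⟩ := List.exists_cons_of_ne_nil (psplit_ne_nil P (d :: t))
      rw [hp1, hp2] at ih ⊢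
      simp only [List.modifyHead_cons]
      have hc := List.forall₂_cons.mp ih
      refine List.Forall₂.cons ?_ hc.2
      rcases hc.1 with h | h
      · exact Or.inl (by rw [h])
      · exact Or.inr (by rw [h]; rfl)

lemma replace_go_eq (l : List Char) :
    ∀ (fuel : Nat) (acc : List Char), l.length ≤ fuel →
      PySem.Chars.replace.go ['\r', '\n'] ['\n'] fuel l acc = acc.reverse ++ repl l := by
  induction l using repl.induct with
  | case1 =>
    intro fuel acc h
    cases fuel <;> simp [PySem.Chars.replace.go, repl]
  | case2 c =>
    intro fuel acc h
    match fuel, h with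
    | fuel + 1, _ =>
      have hpre : List.isPrefixOf ['\r', '\n'] [c] = false := by
        simp [List.isPrefixOf]
      rw [PySem.Chars.replace.go, hpre]
      cases fuel <;> simp [PySem.Chars.replace.go, repl]
  | case3 c d t hcd ih =>
    obtain ⟨hc, hd⟩ := hcd
    subst hc; subst hd
    intro fuel acc h
    match fuel, h with
    | fuel + 1, h =>
      have hpre : List.isPrefixOf ['\r', '\n'] ('\r' :: '\n' :: t) = true := by
        simp [List.isPrefixOf]
      rw [PySem.Chars.replace.go, hpre]
      have hd2 : List.drop (['\r', '\n'] : List Char).length ('\r' :: '\n' :: t) = t := rfl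
      simp only [if_true, hd2]
      rw [ih fuel (['\n'].reverse ++ acc) (by simp at h ⊢; omega)]
      simp [repl]
  | case4 c d t hcd ih =>
    intro fuel acc h
    match fuel, h with
    | fuel + 1, h =>
      have hpre : List.isPrefixOf ['\r', '\n'] (c :: d :: t) = false := by
        simp only [List.isPrefixOf, Bool.and_eq_false_iff, beq_eq_false_iff_ne, ne_eq]
        by_cases h1 : c = '\r'
        · subst h1
          have h2 : d ≠ '\n' := fun h2 => hcd ⟨rfl, h2⟩
          tauto
        · tauto
      rw [PySem.Chars.replace.go, hpre]
      simp only [Bool.false_eq_true, if_false]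
      rw [ih fuel (c :: acc) (by simp at h ⊢; omega)]
      rw [repl, if_neg hcd]
      simp

lemma replace_eq_repl (cs : List Char) :
    PySem.Chars.replace cs ['\r', '\n'] ['\n'] = repl cs := by
  rw [PySem.Chars.replace]
  simp only [List.isEmpty_iff, if_neg (by simp : ¬(['\r', '\n'] : List Char) = [])]
  simpa using replace_go_eq cs cs.length [] le_rfl

lemma splitOn_go_eq (d : Char) (l : List Char) :
    ∀ (fuel : Nat) (cur : List Char) (acc : List (List Char)), l.length < fuel →
      PySem.Chars.splitOn.go [d] fuel l cur acc
        = acc.reverse ++ (psplit (· == d) l).modifyHead (cur.reverse ++ ·) := by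
  induction l with
  | nil =>
    intro fuel cur acc h
    match fuel, h with
    | fuel + 1, _ => simp [PySem.Chars.splitOn.go, psplit]
  | cons c t ih =>
    intro fuel cur acc h
    match fuel, h with
    | fuel + 1, h =>
      by_cases hc : c = d
      · subst hc
        have hpre : List.isPrefixOf [c] (c :: t) = true := by simp [List.isPrefixOf]
        rw [PySem.Chars.splitOn.go, hpre]
        simp only [if_true, List.length_cons, List.drop_succ_cons, List.length_nil, List.drop_zero]
        rw [ih fuel [] (cur.reverse :: acc) (by simp at h ⊢; omega)]
        have : psplit (· == c) (c :: t) = [] :: psplit (· == c) t := by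
          simp [psplit]
        rw [this]
        cases hp : psplit (· == c) t with
        | nil => exact absurd hp (psplit_ne_nil _ t)
        | cons a l0 => simp
      · have hpre : List.isPrefixOf [d] (c :: t) = false := by
          simp [List.isPrefixOf]
          exact fun h' => absurd h'.symm hc
        rw [PySem.Chars.splitOn.go, hpre]
        simp only [Bool.false_eq_true, if_false]
        rw [ih fuel (c :: cur) acc (by simp at h ⊢; omega)]
        have : psplit (· == d) (c :: t) = (psplit (· == d) t).modifyHead (c :: ·) := by
          simp [psplit, hc]
        rw [this]
        cases hp : psplit (· == d) t with
        | nil => exact absurd hp (psplit_ne_nil _ t)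
        | cons a l0 => simp

lemma splitOn_eq_psplit (d : Char) (cs : List Char) :
    PySem.Chars.splitOn cs [d] = psplit (· == d) cs := by
  rw [PySem.Chars.splitOn]
  rw [splitOn_go_eq d cs (cs.length + 1) [] [] (by omega)]
  cases hp : psplit (· == d) cs with
  | nil => exact absurd hp (psplit_ne_nil _ cs)
  | cons a l => simp

lemma inner_foldl (subs : List (List Char)) (parts : List String) :
    subs.foldl
      (fun parts sub =>
        let sub' := PySem.Chars.strip sub
        if sub' = [] then parts else parts ++ [String.ofList sub'])
      parts = parts ++ subs.flatMap tokOf := by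
  induction subs generalizing parts with
  | nil => simp
  | cons s rest ih =>
    simp only [List.foldl_cons, List.flatMap_cons, ih, tokOf]
    split <;> simp

lemma bloop (cs : List Char) :
    ∀ (parts : List String) (buf : List Char), (∀ c ∈ buf, ¬(c = '\n' ∨ c = ';')) →
      ((cs ++ ['\n']).foldl
        (fun (st : List String × List Char) (ch : Char) =>
          if ch = '\n' ∨ ch = ';' then
            (let tok := PySem.Chars.strip st.2
             if tok = [] then st.1 else st.1 ++ [String.ofList tok], [])
          else (st.1, st.2 ++ [ch])) (parts, buf)).1
      = parts ++ (psplit (fun c => c == '\n' || c == ';') (buf ++ cs)).flatMap tokOf := by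
  induction cs with
  | nil =>
    intro parts buf hbuf
    have hb : psplit (fun c => c == '\n' || c == ';') buf = [buf] := by
      induction buf with
      | nil => simp [psplit]
      | cons b bs ihb =>
        have h1 : ¬(b = '\n' ∨ b = ';') := hbuf b (by simp)
        have h2 : (fun c => c == '\n' || c == ';') b = false := by
          simp only [Bool.or_eq_false_iff, beq_eq_false_iff_ne, ne_eq]
          tauto
        simp only [psplit, h2, Bool.false_eq_true, if_false]
        rw [ihb (fun c hc => hbuf c (by simp [hc]))]
        simp
    simp only [List.nil_append, List.append_nil, hb]
    simp only [List.flatMap_cons, List.flatMap_nil, List.append_nil, tokOf]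
    split <;> simp_all
  | cons c rest ih =>
    intro parts buf hbuf
    by_cases hc : c = '\n' ∨ c = ';'
    · simp only [List.cons_append, List.foldl_cons, if_pos hc]
      rw [ih _ [] (by simp)]
      have hb : psplit (fun c => c == '\n' || c == ';') buf = [buf] := by
        induction buf with
        | nil => simp [psplit]
        | cons b bs ihb =>
          have h1 : ¬(b = '\n' ∨ b = ';') := hbuf b (by simp)
          have h2 : (fun c => c == '\n' || c == ';') b = false := by
            simp only [Bool.or_eq_false_iff, beq_eq_false_iff_ne, ne_eq]
            tauto
          simp only [psplit, h2, Bool.false_eq_true, if_false]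
          rw [ihb (fun c hc => hbuf c (by simp [hc]))]
          simp
      have hsplit := psplit_append (fun c => c == '\n' || c == ';') buf (c :: rest)
        (init := []) (last := buf) (by simpa using hb)
      rw [hsplit]
      have hcP : (fun c => c == '\n' || c == ';') c = true := by
        rcases hc with h | h <;> simp [h]
      have : psplit (fun c => c == '\n' || c == ';') (c :: rest)
          = [] :: psplit (fun c => c == '\n' || c == ';') rest := by
        simp only [psplit, hcP, if_true]
      rw [this]
      simp only [List.modifyHead_cons, List.nil_append, List.flatMap_cons, List.append_nil]
      simp only [tokOf]
      split <;> simp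
    · simp only [List.cons_append, List.foldl_cons, if_neg hc]
      rw [ih _ (buf ++ [c]) (by
        intro x hx
        rcases List.mem_append.mp hx with h | h
        · exact hbuf x h
        · simp at h; subst h; exact hc)]
      simp

lemma outer_foldl (L : List (List Char)) (parts : List String) :
    L.foldl
      (fun parts chunk =>
        let chunk' := PySem.Chars.strip chunk
        if chunk' = [] then parts
        else
          (PySem.Chars.splitOn chunk' [';']).foldl
            (fun parts sub =>
              let sub' := PySem.Chars.strip sub
              if sub' = [] then parts else parts ++ [String.ofList sub'])
            parts)
      parts
    = parts ++ L.flatMap (fun ch => (psplit (· == ';') (PySem.Chars.strip ch)).flatMap tokOf) := by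
  induction L generalizing parts with
  | nil => simp
  | cons ch rest ih =>
    simp only [List.foldl_cons, List.flatMap_cons]
    by_cases h : PySem.Chars.strip ch = []
    · rw [if_pos h, ih, h]
      simp [psplit, tokOf, strip_allspace (t := []) (by simp)]
    · rw [if_neg h, inner_foldl, splitOn_eq_psplit, ih]
      simp

lemma ports_agree (cell : String) : split_entries_py cell = split_entries_py_alt cell := by
  have hB : split_entries_py_alt cell
      = (psplit (fun c => c == '\n' || c == ';') cell.toList).flatMap tokOf := by
    rw [split_entries_py_alt]
    rw [bloop cell.toList [] [] (by simp)]
    simp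
  rw [hB, split_entries_py]
  by_cases h : PySem.Chars.strip cell.toList = []
  · rw [if_pos h]
    rw [← strip_inv _ cell.toList, h]
    simp [psplit, tokOf, strip_allspace (t := []) (by simp)]
  · rw [if_neg h, outer_foldl]
    simp only [List.nil_append]
    simp only [strip_inv]
    rw [← List.flatMap_assoc, splitOn_eq_psplit, psplit_union, replace_eq_repl]
    rw [repl_inv _ (by decide) (by decide), strip_inv]

-- ===== VERDICT (by name: the statement is the Claim_ definition above) =====
theorem split_entries_py_spec : Claim_equal_split_entries_py := by
  intro cell _
  unfold Spec_split_entries_py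
  exact ports_agree cell
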